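-- pv_equiv track=rewrite | github.com/nntu079/ga | test_makeF02.py | makeF0
-- ===== SOURCE A (Python) =====
-- import itertools
--
-- def makeF0(suppliers, capacity,current_capacity, n_max):    #CHƯA GIẢNG
--     F0 = []
--     all_suppliers = list(suppliers.keys())
--
--     set_current_capacity = []
--     for sup in all_suppliers:
--         if(suppliers[sup] <= current_capacity):
--             set_current_capacity.append(sup)
--
--     count = 0
--     for sup1 in set_current_capacity:
--
--
--         temp = []
--         for sup in all_suppliers:
--             if(sup != sup1):
--                 temp.append(sup)
--
--         temp2 = itertools.permutations(temp)
--
--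
--         for half_individual in temp2:
--             individual = [[sup1]]
--             for gen in half_individual:
--                 individual.append([gen])
--             F0.append(individual)
--             count +=1
--             if(count>n_max):
--                 return F0[:n_max]
--
--     return F0[:n_max]
-- ===== SOURCE B (Python) =====
-- def makeF0(suppliers, capacity, current_capacity, n_max):
--     keys = list(suppliers)
--     n = len(keys)
--     feasible = [s for s in keys if suppliers[s] <= current_capacity]
--     fact = [1]
--     for i in range(1, n):
--         fact.append(fact[-1] * i)
--     per = fact[n - 1] if n > 0 else 1
--     total = len(feasible) * per
--     m = min(n_max, total) if n_max > 0 else 0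
--     result = []
--     for k in range(m):
--         leader = feasible[k // per]
--         rest = keys.copy()
--         rest.remove(leader)
--         r = k % per
--         individual = [[leader]]
--         # digits with fact[i - 1] > r are 0, so that prefix of rest stays in place
--         j = n - 1
--         while j > 0 and fact[j - 1] > r:
--             j -= 1
--         individual.extend([s] for s in rest[:n - 1 - j])
--         tail = rest[n - 1 - j:]
--         for i in range(j, 0, -1):
--             idx, r = divmod(r, fact[i - 1])
--             individual.append([tail.pop(idx)])
--         result.append(individual)
--     return result
-- ===== Notes on version B (the rewrite author's own statement) =====
-- stated objective: alternative
-- what changed: Replaces A's nested leader-loop over itertools.permutations with early-return counter and final slice by closed-form counting plus factorial-number-system unranking: B computes total = len(feasible)*(n-1)! and builds exactly the min(n_max, total) requested individuals directly, decoding each index k without enumerating or skipping any permutation.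
import Mathlib
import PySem

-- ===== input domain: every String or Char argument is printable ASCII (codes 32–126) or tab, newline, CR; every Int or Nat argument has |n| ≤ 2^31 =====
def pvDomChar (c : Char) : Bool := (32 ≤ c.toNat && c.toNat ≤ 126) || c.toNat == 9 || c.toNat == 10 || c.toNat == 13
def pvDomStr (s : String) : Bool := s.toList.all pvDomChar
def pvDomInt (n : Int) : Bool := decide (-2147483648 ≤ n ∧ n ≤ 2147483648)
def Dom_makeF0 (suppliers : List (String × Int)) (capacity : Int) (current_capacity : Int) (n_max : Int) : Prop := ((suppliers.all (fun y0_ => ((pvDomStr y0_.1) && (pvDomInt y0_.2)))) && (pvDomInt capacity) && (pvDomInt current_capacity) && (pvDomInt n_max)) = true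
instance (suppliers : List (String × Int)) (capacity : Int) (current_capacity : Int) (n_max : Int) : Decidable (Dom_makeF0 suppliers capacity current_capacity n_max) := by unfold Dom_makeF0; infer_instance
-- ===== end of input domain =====

-- B replaces A's per-leader enumeration of itertools.permutations (with a counter, two
-- early-return sites and a final slice) by closed-form counting + factorial-number-system
-- unranking: it computes total = len(feasible)*(n-1)! and builds the k-th individual
-- directly for each requested k (objective: alternative algorithm, same output).


-- ===== PORT A =====
-- the inner 'for half_individual in temp2' loop; Sum.inl = the early 'return F0[:n_max]'
def pvInnerA (n_max : Int) (sup1 : String) :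
    List (List String) → List (List (List String)) → Int →
    Sum (List (List (List String))) (List (List (List String)) × Int)
  | [], F0, count => Sum.inr (F0, count)
  | half :: rest, F0, count =>
      let F0' := F0 ++ [[sup1] :: half.map (fun g => [g])]
      let count' := count + 1
      if count' > n_max then Sum.inl (PySem.List.slice F0' none (some n_max))
      else pvInnerA n_max sup1 rest F0' count'

-- the outer 'for sup1 in set_current_capacity' loop
def pvOuterA (n_max : Int) (all : List String) :
    List String → List (List (List String)) → Int → List (List (List String))
  | [], F0, _ => PySem.List.slice F0 none (some n_max)
  | sup1 :: ls, F0, count =>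
      let temp := all.foldl (fun acc s => if s ≠ sup1 then acc ++ [s] else acc) []
      match pvInnerA n_max sup1 (PySem.List.permutations temp temp.length) F0 count with
      | Sum.inl r => r
      | Sum.inr (F0', count') => pvOuterA n_max all ls F0' count'

def makeF0 (suppliers : List (String × Int)) (capacity : Int) (current_capacity : Int) (n_max : Int) : List (List (List String)) :=
  let d := PySem.Dict.ofList suppliers
  let all_suppliers := PySem.Dict.keys d
  let set_current_capacity := all_suppliers.foldl
    (fun acc s => if (PySem.Dict.get? d s).getD 0 ≤ current_capacity then acc ++ [s] else acc) []
  pvOuterA n_max all_suppliers set_current_capacity [] 0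

-- ===== PORT B =====
-- the inner 'for i in range(n-1, 0, -1)' unranking loop; state = (rest, r, individual)
def pvStepB (fact : List Int) (st : List String × Int × List (List String)) (i : Int) :
    List String × Int × List (List String) :=
  let f := (PySem.List.pyGet? fact (i - 1)).getD 0
  let idx := PySem.Int.floordiv st.2.1 f
  let r' := PySem.Int.mod st.2.1 f
  match PySem.List.pop? st.1 idx with
  | some (x, rest') => (rest', r', st.2.2 ++ [[x]])
  | none => (st.1, r', st.2.2)   -- unreachable for k < total (Python would raise IndexError)

-- the 'while j > 0 and fact[j - 1] > r: j -= 1' loop (fuel bounds the iteration count)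
def pvWhileJ (fact : List Int) (r : Int) : Nat → Int → Int
  | 0, j => j
  | fuel + 1, j =>
      if j > 0 ∧ (PySem.List.pyGet? fact (j - 1)).getD 0 > r then pvWhileJ fact r fuel (j - 1)
      else j

def makeF0_alt (suppliers : List (String × Int)) (capacity : Int) (current_capacity : Int) (n_max : Int) : List (List (List String)) :=
  let d := PySem.Dict.ofList suppliers
  let keys := PySem.Dict.keys d
  let n : Int := (keys.length : Int)
  let feasible := keys.filter (fun s => decide ((PySem.Dict.get? d s).getD 0 ≤ current_capacity))
  let fact := (PySem.List.pyRange 1 n 1).foldl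
      (fun f i => f ++ [(PySem.List.pyGet? f (-1)).getD 0 * i]) [(1 : Int)]
  let per := if n > 0 then (PySem.List.pyGet? fact (n - 1)).getD 0 else 1
  let total := (feasible.length : Int) * per
  let m := if n_max > 0 then min n_max total else 0
  (PySem.List.pyRange 0 m 1).foldl (fun result k =>
    let leader := (PySem.List.pyGet? feasible (PySem.Int.floordiv k per)).getD ""
    let rest := match PySem.List.remove? keys leader with
      | some l => l
      | none => keys   -- unreachable: leader ∈ keys (Python raises ValueError otherwise)
    let r := PySem.Int.mod k per
    let j := pvWhileJ fact r keys.length (n - 1)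
    let individual := [[leader]] ++ (PySem.List.slice rest none (some (n - 1 - j))).map (fun s => [s])
    let tail := PySem.List.slice rest (some (n - 1 - j)) none
    let st := (PySem.List.pyRange j 0 (-1)).foldl (pvStepB fact) (tail, r, individual)
    result ++ [st.2.2]) []

-- ===== PRECONDITION & SPEC =====
def Spec_makeF0 (suppliers : List (String × Int)) (capacity : Int) (current_capacity : Int) (n_max : Int) (out : List (List (List String))) : Prop := out = makeF0_alt suppliers capacity current_capacity n_max
instance (suppliers : List (String × Int)) (capacity : Int) (current_capacity : Int) (n_max : Int) (out : List (List (List String))) : Decidable (Spec_makeF0 suppliers capacity current_capacity n_max out) := by unfold Spec_makeF0; infer_instance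

-- ===== CLAIM (what is proved, stated in full; the proofs are below) =====
def Claim_equal_makeF0 : Prop := ∀ (suppliers : List (String × Int)) (capacity : Int) (current_capacity : Int) (n_max : Int), Dom_makeF0 suppliers capacity current_capacity n_max → Spec_makeF0 suppliers capacity current_capacity n_max (makeF0 suppliers capacity current_capacity n_max)

-- ===== LEMMAS AND PROOFS =====

-- mathematical unranking: pvUnrank L xs r = permutation number r (0-based, itertools order)
-- of xs, for xs.length = L and r < L!
def pvUnrank : Nat → List String → Nat → List String
  | 0, _, _ => []
  | L + 1, xs, r =>
      match xs[r / Nat.factorial L]? with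
      | none => []
      | some y => y :: pvUnrank L (xs.eraseIdx (r / Nat.factorial L)) (r % Nat.factorial L)

-- chunking of an index range by blocks of size b
theorem pvChunk {β : Type} (b : Nat) (g : Nat → β) :
    ∀ (a : Nat), (List.range (a * b)).map g
      = (List.range a).flatMap (fun i => (List.range b).map (fun j => g (i * b + j))) := by
  intro a
  induction a with
  | zero => simp
  | succ a ih =>
    have : (a + 1) * b = a * b + b := by ring
    rw [this, List.range_add, List.range_succ, List.map_append, List.flatMap_append, ← ih]
    simp [List.map_map, Function.comp]

-- unranking all ranks 0..L!-1 yields exactly itertools.permutations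
theorem pvUnrankPerm : ∀ (c : Nat) (xs : List String), xs.length = c →
    (List.range (Nat.factorial c)).map (pvUnrank c xs) = PySem.List.permutations xs c := by
  intro c
  induction c with
  | zero =>
    intro xs h
    rw [PySem.List.permutations]
    simp [Nat.factorial, pvUnrank, List.range_succ]
  | succ c ih =>
    intro xs h
    rw [PySem.List.permutations]
    show _ = (List.range xs.length).flatMap _
    rw [Nat.factorial_succ, pvChunk, h]
    apply List.flatMap_congr
    intro i hi
    rw [List.mem_range] at hi
    have hlt : i < xs.length := by omega
    rw [List.getElem?_eq_getElem hlt]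
    show _ = (PySem.List.permutations (xs.eraseIdx i) c).map _
    have herase : (xs.eraseIdx i).length = c := by
      rw [List.length_eraseIdx, if_pos hlt]; omega
    rw [← ih (xs.eraseIdx i) herase, List.map_map]
    apply List.map_congr_left
    intro j hj
    rw [List.mem_range] at hj
    have hf : 0 < Nat.factorial c := Nat.factorial_pos c
    have hdiv : (i * Nat.factorial c + j) / Nat.factorial c = i := by
      rw [Nat.add_comm, Nat.add_mul_div_right _ _ hf, Nat.div_eq_of_lt hj, Nat.zero_add]
    have hmod : (i * Nat.factorial c + j) % Nat.factorial c = j := by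
      rw [Nat.add_comm, Nat.add_mul_mod_self_right, Nat.mod_eq_of_lt hj]
    show pvUnrank (c+1) xs (i * Nat.factorial c + j) = _
    rw [pvUnrank, hdiv, hmod, List.getElem?_eq_getElem hlt]
    rfl

theorem pvPermsLen (c : Nat) (xs : List String) (h : xs.length = c) :
    (PySem.List.permutations xs c).length = Nat.factorial c := by
  rw [← pvUnrankPerm c xs h]; simp

theorem pvPermsNeNil (xs : List String) : PySem.List.permutations xs xs.length ≠ [] := by
  have := pvPermsLen xs.length xs rfl
  intro hc
  rw [hc] at this
  exact absurd this.symm (Nat.factorial_pos _).ne'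

-- === A-side loop characterisations (as in the slice-free formula) ===
theorem pvSliceNil {α : Type} (n : Int) : PySem.List.slice ([] : List α) none (some n) = [] := by
  simp [PySem.List.slice]

theorem pvSliceSingleton {α : Type} (x : α) (n : Int) (h : n ≤ 0) :
    PySem.List.slice [x] none (some n) = [] := by
  rcases lt_or_eq_of_le h with hlt | rfl
  · have hk : n = -(((-n).toNat : Nat) : Int) := by omega
    rw [hk, PySem.List.slice_to_neg_natCast _ _ (by omega)]
    have : (1 : Nat) - (-n).toNat = 0 := by omega
    simp [this]
  · rw [PySem.List.slice_to _ le_rfl]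
    rfl

theorem pvInnerAChar (n : Int) (x : String) :
    ∀ (ps : List (List String)) (res : List (List (List String))), (res.length : Int) ≤ n →
      pvInnerA n x ps res (res.length : Int) =
        if ((res.length : Int) + ps.length > n) then
          Sum.inl ((res ++ ps.map (fun half => [x] :: half.map (fun g => [g]))).take n.toNat)
        else
          Sum.inr (res ++ ps.map (fun half => [x] :: half.map (fun g => [g])),
            ((res ++ ps.map (fun half => [x] :: half.map (fun g => [g]))).length : Int)) := by
  intro ps
  induction ps with
  | nil =>
    intro res hres
    simp only [pvInnerA, List.map_nil, List.append_nil, List.length_nil, Nat.cast_zero, add_zero]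
    rw [if_neg (by omega)]
  | cons half rest ih =>
    intro res hres
    simp only [pvInnerA]
    by_cases hexit : (res.length : Int) + 1 > n
    · have hlen : (res.length : Int) = n := by omega
      rw [if_pos (by omega), if_pos (by simp only [List.length_cons]; omega)]
      congr 1
      rw [PySem.List.slice_to _ (by omega : (0:Int) ≤ n)]
      have hnt : n.toNat = res.length := by omega
      rw [hnt, List.take_append_of_le_length le_rfl, List.take_append_of_le_length le_rfl]
    · rw [if_neg (by simp; omega)]
      have hstep : (res.length : Int) + 1 = (((res ++ [[x] :: half.map (fun g => [g])]).length : Nat) : Int) := by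
        simp
      rw [hstep]
      rw [ih (res ++ [[x] :: half.map (fun g => [g])]) (by simp; omega)]
      by_cases hcond : (res.length : Int) + ((half :: rest).length : Int) > n
      · rw [if_pos (by simp at hcond ⊢; omega), if_pos (by omega)]
        simp
      · rw [if_neg (by simp at hcond ⊢; omega), if_neg (by omega)]
        simp

theorem pvOuterAChar (n : Int) (all : List String) (hn : 0 < n) :
    ∀ (ls : List String) (res : List (List (List String))), (res.length : Int) ≤ n →
      pvOuterA n all ls res (res.length : Int) =
        (res ++ ls.flatMap (fun l =>
          (PySem.List.permutations (all.filter (fun s => decide (s ≠ l)))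
              (all.filter (fun s => decide (s ≠ l))).length).map
            (fun half => [l] :: half.map (fun g => [g])))).take n.toNat := by
  intro ls
  induction ls with
  | nil =>
    intro res hres
    simp only [pvOuterA, List.flatMap_nil, List.append_nil]
    rw [PySem.List.slice_to _ (by omega : (0:Int) ≤ n)]
  | cons sup1 ls ih =>
    intro res hres
    simp only [pvOuterA, List.flatMap_cons]
    have htemp : all.foldl (fun acc s => if s ≠ sup1 then acc ++ [s] else acc) [] =
        all.filter (fun s => decide (s ≠ sup1)) := by
      rw [PySem.List.foldl_append_ite_eq_filter]
      rfl
    rw [htemp, pvInnerAChar n sup1 _ res hres]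
    by_cases hexit : (res.length : Int) + ((PySem.List.permutations (all.filter (fun s => decide (s ≠ sup1))) (all.filter (fun s => decide (s ≠ sup1))).length).length : Int) > n
    · rw [if_pos hexit]
      dsimp only
      rw [← List.append_assoc]
      exact (List.take_append_of_le_length
        (by simp only [List.length_append, List.length_map]; omega)).symm
    · rw [if_neg hexit]
      dsimp only
      rw [ih _ (by simp only [List.length_append, List.length_map]; push_cast; omega)]
      rw [List.append_assoc]

theorem pvTopA (n : Int) (all : List String) (p : String → Prop) [DecidablePred p] :
    pvOuterA n all (all.foldl (fun acc s => if p s then acc ++ [s] else acc) []) [] 0 =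
      if n ≤ 0 then []
      else ((all.filter (fun s => decide (p s))).flatMap (fun leader =>
        (PySem.List.permutations (all.filter (fun s => decide (s ≠ leader)))
            (all.filter (fun s => decide (s ≠ leader))).length).map
          (fun perm => [leader] :: perm.map (fun g => [g])))).take n.toNat := by
  have hsetcc : all.foldl (fun acc s => if p s then acc ++ [s] else acc) [] =
      all.filter (fun s => decide (p s)) := by
    rw [PySem.List.foldl_append_ite_eq_filter]
    rfl
  rw [hsetcc]
  by_cases hn : n ≤ 0
  · rw [if_pos hn]
    cases hf : all.filter (fun s => decide (p s)) with
    | nil => simp [pvOuterA, pvSliceNil]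
    | cons l ls =>
      simp only [pvOuterA]
      rcases hp : PySem.List.permutations (all.foldl (fun acc s => if s ≠ l then acc ++ [s] else acc) []) (all.foldl (fun acc s => if s ≠ l then acc ++ [s] else acc) []).length with _ | ⟨q, t⟩
      · exact absurd hp (pvPermsNeNil _)
      · simp only [pvInnerA]
        rw [if_pos (by omega)]
        simp only [List.nil_append]
        rw [pvSliceSingleton _ _ hn]
  · rw [if_neg hn]
    have := pvOuterAChar n all (by omega) (all.filter (fun s => decide (p s))) []
      (by simp only [List.length_nil, Nat.cast_zero]; omega)
    simpa using this

-- === B-side characterisations ===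

-- the factorial table built by B's fold
theorem pvFactEq : ∀ (k : Nat),
    (PySem.List.pyRange 1 (1 + (k : Int)) 1).foldl
        (fun f i => f ++ [(PySem.List.pyGet? f (-1)).getD 0 * i]) [(1 : Int)]
      = (List.range (k + 1)).map (fun i => ((Nat.factorial i : Nat) : Int)) := by
  intro k
  induction k with
  | zero =>
    rw [PySem.List.pyRange_one_eq_nil (by norm_num)]
    simp [List.range_succ, Nat.factorial]
  | succ k ih =>
    have hsplit : 1 + ((k + 1 : Nat) : Int) = (1 + (k : Nat)) + 1 := by push_cast; ring
    rw [hsplit, PySem.List.pyRange_one_succ_right (by omega), List.foldl_append, ih]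
    simp only [List.foldl_cons, List.foldl_nil]
    have hlast : ((List.range (k + 1)).map (fun i => ((Nat.factorial i : Nat) : Int))).getLast?
        = some ((Nat.factorial k : Nat) : Int) := by
      rw [List.range_succ, List.map_append]
      simp
    rw [PySem.List.pyGet?_neg_one, hlast]
    rw [List.range_succ (n := k + 1), List.map_append]
    simp only [Option.getD_some, List.map_cons, List.map_nil]
    congr 2
    rw [Nat.factorial_succ]
    push_cast
    ring

-- the inner unranking fold builds the unranked permutation (as singleton genes)
theorem pvInnerBChar (fact : List Int)
    (hfact : ∀ j : Nat, (j : Int) < (fact.length : Int) →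
      (PySem.List.pyGet? fact (j : Int)).getD 0 = ((Nat.factorial j : Nat) : Int)) :
    ∀ (L : Nat) (rest : List String) (rN : Nat) (acc : List (List String)),
      rest.length = L → rN < Nat.factorial L → L ≤ fact.length →
      ((PySem.List.pyRange (L : Int) 0 (-1)).foldl (pvStepB fact) (rest, (rN : Int), acc)).2.2
        = acc ++ (pvUnrank L rest rN).map (fun s => [s]) := by
  intro L
  induction L with
  | zero =>
    intro rest rN acc hlen hr _
    rw [Nat.cast_zero, PySem.List.pyRange_neg_one_eq_nil le_rfl]
    interval_cases rN
    simp [pvUnrank]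
  | succ L ih =>
    intro rest rN acc hlen hr hle
    have hcast : ((L + 1 : Nat) : Int) = (L : Int) + 1 := by push_cast; ring
    rw [hcast, PySem.List.pyRange_neg_one_cons (by omega), List.foldl_cons]
    have hq : rN / Nat.factorial L < rest.length := by
      have := Nat.factorial_pos L
      have h2 : rN / Nat.factorial L < L + 1 :=
        Nat.div_lt_of_lt_mul (by rw [Nat.mul_comm]; simpa [Nat.factorial_succ] using hr)
      omega
    have hstep : pvStepB fact (rest, (rN : Int), acc) ((L : Int) + 1)
        = (rest.eraseIdx (rN / Nat.factorial L), ((rN % Nat.factorial L : Nat) : Int),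
           acc ++ [[rest[rN / Nat.factorial L]'hq]]) := by
      unfold pvStepB
      have h1 : ((L : Int) + 1 - 1) = ((L : Nat) : Int) := by ring
      rw [h1, hfact L (by exact_mod_cast hle)]
      simp only
      rw [PySem.Int.floordiv_natCast, PySem.Int.mod_natCast, PySem.List.pop?_natCast _ _ hq]
    rw [hstep]
    have h11 : (L : Int) + 1 - 1 = (L : Int) := by ring
    rw [h11]
    rw [ih _ _ _ (by rw [List.length_eraseIdx, if_pos hq]; omega)
      (Nat.mod_lt _ (Nat.factorial_pos L)) (by omega)]
    rw [pvUnrank, List.getElem?_eq_getElem hq]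
    simp

-- indexing a list over range of its length is the list itself (flatMap form)
theorem pvFlatMapGetD {β : Type} (d : String) (g : String → List β) :
    ∀ (l : List String), (List.range l.length).flatMap (fun i => g (l.getD i d)) = l.flatMap g := by
  intro l
  induction l with
  | nil => simp
  | cons x l ih =>
    rw [List.length_cons, List.range_succ_eq_map, List.flatMap_cons, List.flatMap_map]
    simp only [List.getD_cons_zero, List.getD_cons_succ]
    rw [List.flatMap_cons, ih]

-- removing one element of a duplicate-free list by filtering
theorem pvFilterNeLen (xs : List String) (x : String) (hnd : xs.Nodup) (hx : x ∈ xs) :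
    (xs.filter (fun s => decide (s ≠ x))).length + 1 = xs.length := by
  induction xs with
  | nil => simp at hx
  | cons y ys ih =>
    rw [List.nodup_cons] at hnd
    rcases List.mem_cons.mp hx with rfl | hmem
    · rw [List.filter_cons_of_neg (by simp)]
      have : ys.filter (fun s => decide (s ≠ x)) = ys := by
        apply List.filter_eq_self.mpr
        intro a ha
        simp only [decide_eq_true_iff]
        intro h; exact hnd.1 (h ▸ ha)
      rw [this, List.length_cons]
    · have hyx : y ≠ x := fun h => hnd.1 (h ▸ hmem)
      rw [List.filter_cons_of_pos (by simpa using hyx), List.length_cons, List.length_cons]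
      rw [← ih hnd.2 hmem]


-- list.remove on a duplicate-free list is the 'all other elements' filter
theorem pvRemoveEqFilter (xs : List String) (x : String) (hnd : xs.Nodup) (hx : x ∈ xs) :
    PySem.List.remove? xs x = some (xs.filter (fun s => decide (s ≠ x))) := by
  rw [PySem.List.remove?_eq_some_erase xs x hx, List.Nodup.erase_eq_filter hnd x]
  congr 1
  apply List.filter_congr
  intro a _
  by_cases h : a = x
  · simp [bne, h]
  · simp [bne, h]

-- the while loop lands on some jN ≤ j with rN < jN! and every skipped digit zero
theorem pvWhileJChar (fact : List Int)
    (hfact : ∀ i : Nat, (i : Int) < (fact.length : Int) →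
      (PySem.List.pyGet? fact (i : Int)).getD 0 = ((Nat.factorial i : Nat) : Int)) (rN : Nat) :
    ∀ (fuel j : Nat), j ≤ fact.length → rN < Nat.factorial j →
      ∃ jN : Nat, pvWhileJ fact (rN : Int) fuel ((j : Nat) : Int) = ((jN : Nat) : Int) ∧
        jN ≤ j ∧ rN < Nat.factorial jN ∧
        (∀ i : Nat, jN < i → i ≤ j → rN < Nat.factorial (i - 1)) := by
  intro fuel
  induction fuel with
  | zero =>
    intro j _ hj
    exact ⟨j, rfl, le_rfl, hj, fun i h1 h2 => absurd h1 (by omega)⟩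
  | succ fuel ih =>
    intro j hjlen hj
    rw [pvWhileJ]
    by_cases hc : ((j : Nat) : Int) > 0 ∧
        (PySem.List.pyGet? fact (((j : Nat) : Int) - 1)).getD 0 > (rN : Int)
    · rw [if_pos hc]
      obtain ⟨hj0, hgt⟩ := hc
      have hjpos : 0 < j := by exact_mod_cast hj0
      have hcast : ((j : Nat) : Int) - 1 = ((j - 1 : Nat) : Int) := by omega
      rw [hcast, hfact (j - 1) (by exact_mod_cast (by omega : j - 1 < fact.length))] at hgt
      have hrfac : rN < Nat.factorial (j - 1) := by exact_mod_cast hgt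
      obtain ⟨jN, heq, hle, hlt, hall⟩ := ih (j - 1) (by omega) hrfac
      refine ⟨jN, by rw [hcast]; exact heq, by omega, hlt, ?_⟩
      intro i h1 h2
      rcases Nat.lt_or_ge (j - 1) i with h3 | h3
      · have : i = j := by omega
        subst this
        exact hrfac
      · exact hall i h1 h3
    · rw [if_neg hc]
      exact ⟨j, rfl, le_rfl, hj, fun i h1 h2 => absurd h1 (by omega)⟩

-- digits with factorial above the rank are zero: only the tail is permuted
theorem pvUnrankPrefix : ∀ (L jN : Nat) (rest : List String) (rN : Nat),
    rest.length = L → jN ≤ L →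
    (∀ i : Nat, jN < i → i ≤ L → rN < Nat.factorial (i - 1)) →
    pvUnrank L rest rN = rest.take (L - jN) ++ pvUnrank jN (rest.drop (L - jN)) rN := by
  intro L
  induction L with
  | zero =>
    intro jN rest rN hlen hle _
    have : jN = 0 := by omega
    subst this
    simp
  | succ L ih =>
    intro jN rest rN hlen hle hall
    rcases Nat.lt_or_ge jN (L + 1) with hlt | hge
    · -- jN ≤ L: the top digit is zero
      have hr : rN < Nat.factorial L := by
        have := hall (L + 1) (by omega) le_rfl
        simpa using this
      cases rest with
      | nil => simp at hlen
      | cons x rest' =>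
        rw [pvUnrank]
        have hdiv : rN / Nat.factorial L = 0 := Nat.div_eq_of_lt hr
        have hmod : rN % Nat.factorial L = rN := Nat.mod_eq_of_lt hr
        rw [hdiv, hmod]
        simp only [List.getElem?_cons_zero, List.eraseIdx_cons_zero]
        rw [ih jN rest' rN (by simpa using hlen) (by omega) (by
          intro i h1 h2
          exact hall i h1 (by omega))]
        have hsub : L + 1 - jN = (L - jN) + 1 := by omega
        rw [hsub]
        simp
    · have : jN = L + 1 := by omega
      subst this
      simp

-- === main B-side evaluation: B's body (over any key list / feasibility predicate) equals
-- the slice-free A formula ===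
theorem pvMainB (keys : List String) (hnd : keys.Nodup) (P : String → Prop) [DecidablePred P] (nm : Int) :
    (let n : Int := (keys.length : Int)
     let feasible := keys.filter (fun s => decide (P s))
     let fact := (PySem.List.pyRange 1 n 1).foldl
        (fun f i => f ++ [(PySem.List.pyGet? f (-1)).getD 0 * i]) [(1 : Int)]
     let per := if n > 0 then (PySem.List.pyGet? fact (n - 1)).getD 0 else 1
     let total := (feasible.length : Int) * per
     let m := if nm > 0 then min nm total else 0
     (PySem.List.pyRange 0 m 1).foldl (fun result k =>
        let leader := (PySem.List.pyGet? feasible (PySem.Int.floordiv k per)).getD ""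
        let rest := match PySem.List.remove? keys leader with
          | some l => l
          | none => keys
        let r := PySem.Int.mod k per
        let j := pvWhileJ fact r keys.length (n - 1)
        let individual := [[leader]] ++
          (PySem.List.slice rest none (some (n - 1 - j))).map (fun s => [s])
        let tail := PySem.List.slice rest (some (n - 1 - j)) none
        let st := (PySem.List.pyRange j 0 (-1)).foldl (pvStepB fact) (tail, r, individual)
        result ++ [st.2.2]) [])
    = if nm ≤ 0 then []
      else ((keys.filter (fun s => decide (P s))).flatMap (fun leader =>
        (PySem.List.permutations (keys.filter (fun s => decide (s ≠ leader)))
            (keys.filter (fun s => decide (s ≠ leader))).length).map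
          (fun perm => [leader] :: perm.map (fun g => [g])))).take nm.toNat := by
  dsimp only
  -- abbreviations
  set nN := keys.length with hnN
  set feasible := keys.filter (fun s => decide (P s)) with hfs
  set fact := (PySem.List.pyRange 1 (nN : Int) 1).foldl
      (fun f i => f ++ [(PySem.List.pyGet? f (-1)).getD 0 * i]) [(1 : Int)] with hfact0
  -- the factorial table
  have hfactList : fact = (List.range (max nN 1)).map (fun i => ((Nat.factorial i : Nat) : Int)) := by
    rcases Nat.eq_zero_or_pos nN with h0 | hpos
    · rw [hfact0, h0]
      rw [PySem.List.pyRange_one_eq_nil (by norm_num)]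
      simp [List.range_succ, Nat.factorial]
    · have : (nN : Int) = 1 + ((nN - 1 : Nat) : Int) := by omega
      rw [hfact0, this, pvFactEq (nN - 1)]
      congr 2
      omega
  have hperN : (if (nN : Int) > 0 then (PySem.List.pyGet? fact ((nN : Int) - 1)).getD 0 else 1)
      = ((Nat.factorial (nN - 1) : Nat) : Int) := by
    rcases Nat.eq_zero_or_pos nN with h0 | hpos
    · rw [if_neg (by omega)]
      rw [h0]
      norm_num [Nat.factorial]
    · rw [if_pos (by omega)]
      have hidx : ((nN : Int) - 1) = ((nN - 1 : Nat) : Int) := by omega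
      rw [hidx]
      show PySem.List.pyGetD fact ((nN - 1 : Nat) : Int) 0 = _
      rw [PySem.List.pyGetD_natCast, hfactList,
        PySem.List.getD_map_range _ _ _ _ (by omega)]
  rw [hperN]
  set perN := Nat.factorial (nN - 1) with hperdef
  have hperpos : 0 < perN := Nat.factorial_pos _
  set totalN := feasible.length * perN with htotal
  have htotalc : (feasible.length : Int) * ((perN : Nat) : Int) = ((totalN : Nat) : Int) := by
    rw [htotal]; push_cast; ring
  rw [htotalc]
  by_cases hnm : nm ≤ 0
  · rw [if_pos hnm, if_neg (by omega)]
    rw [PySem.List.pyRange_one_eq_nil le_rfl]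
    rfl
  · rw [if_neg hnm, if_pos (by omega)]
    have hmN : min nm ((totalN : Nat) : Int) = ((min nm.toNat totalN : Nat) : Int) := by
      omega
    rw [hmN]
    set mN := min nm.toNat totalN with hmdef
    rw [PySem.List.pyRange_zero_natCast, PySem.List.foldl_append_singleton_eq_map, List.nil_append,
      List.map_map]
    -- the decoded k-th individual
    have hbody : ∀ kN : Nat, kN < totalN →
        (let leader := (PySem.List.pyGet? feasible
            (PySem.Int.floordiv ((kN : Nat) : Int) ((perN : Nat) : Int))).getD ""
         let rest := match PySem.List.remove? keys leader with
           | some l => l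
           | none => keys
         let r := PySem.Int.mod ((kN : Nat) : Int) ((perN : Nat) : Int)
         let j := pvWhileJ fact r keys.length ((nN : Int) - 1)
         let individual := [[leader]] ++
            (PySem.List.slice rest none (some ((nN : Int) - 1 - j))).map (fun s => [s])
         let tail := PySem.List.slice rest (some ((nN : Int) - 1 - j)) none
         let st := (PySem.List.pyRange j 0 (-1)).foldl (pvStepB fact) (tail, r, individual)
         st.2.2)
        = [feasible.getD (kN / perN) ""] ::
            (pvUnrank (nN - 1) (keys.filter (fun s => decide (s ≠ feasible.getD (kN / perN) "")))
              (kN % perN)).map (fun s => [s]) := by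
      intro kN hk
      have hF : 0 < feasible.length := by
        rcases Nat.eq_zero_or_pos feasible.length with h | h
        · exfalso
          rw [htotal, h, Nat.zero_mul] at hk
          omega
        · exact h
      have hNpos : 0 < nN := by
        have : feasible.length ≤ nN := by
          rw [hfs, hnN]; exact List.length_filter_le _ _
        omega
      dsimp only
      rw [PySem.Int.floordiv_natCast, PySem.Int.mod_natCast]
      have hqlt : kN / perN < feasible.length := Nat.div_lt_of_lt_mul (by rw [Nat.mul_comm]; omega)
      have hleader : (PySem.List.pyGet? feasible ((kN / perN : Nat) : Int)).getD ""
          = feasible.getD (kN / perN) "" := by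
        show PySem.List.pyGetD feasible ((kN / perN : Nat) : Int) "" = _
        rw [PySem.List.pyGetD_natCast]
      rw [hleader]
      set leader := feasible.getD (kN / perN) "" with hld
      have hmem : leader ∈ keys := by
        rw [hld, List.getD_eq_getElem _ _ hqlt]
        exact List.mem_of_mem_filter (List.getElem_mem hqlt)
      have hrest : (keys.filter (fun s => decide (s ≠ leader))).length = nN - 1 := by
        have := pvFilterNeLen keys leader hnd hmem
        omega
      rw [pvRemoveEqFilter keys leader hnd hmem]
      have hidx : (nN : Int) - 1 = ((nN - 1 : Nat) : Int) := by omega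
      have hfactLk : ∀ i : Nat, (i : Int) < (fact.length : Int) →
          (PySem.List.pyGet? fact (i : Int)).getD 0 = ((Nat.factorial i : Nat) : Int) := by
        intro i hi
        rw [hfactList] at hi ⊢
        rw [List.length_map, List.length_range] at hi
        show PySem.List.pyGetD _ ((i : Nat) : Int) 0 = _
        rw [PySem.List.pyGetD_natCast,
          PySem.List.getD_map_range _ _ _ _ (by exact_mod_cast hi)]
      have hflen : fact.length = max nN 1 := by
        rw [hfactList, List.length_map, List.length_range]
      have hrlt : kN % perN < Nat.factorial (nN - 1) := by
        rw [← hperdef]; exact Nat.mod_lt _ hperpos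
      rw [hidx]
      obtain ⟨jN, hjeq, hjle, hjlt, hjall⟩ :=
        pvWhileJChar fact hfactLk (kN % perN) nN (nN - 1) (by omega) hrlt
      rw [show keys.length = nN from rfl, hjeq]
      have hsub : ((nN - 1 : Nat) : Int) - ((jN : Nat) : Int) = ((nN - 1 - jN : Nat) : Int) := by
        omega
      rw [hsub, PySem.List.slice_to_natCast, PySem.List.slice_from_natCast]
      have htail : ((keys.filter (fun s => decide (s ≠ leader))).drop (nN - 1 - jN)).length = jN := by
        rw [List.length_drop, hrest]
        omega
      rw [pvInnerBChar fact hfactLk jN _ _ _ htail hjlt (by omega)]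
      rw [pvUnrankPrefix (nN - 1) jN _ (kN % perN) hrest hjle hjall]
      simp [List.map_append]
    -- rewrite every body application below mN < totalN
    have hcongr : (List.range mN).map
          ((fun k => (let leader := (PySem.List.pyGet? feasible
              (PySem.Int.floordiv k ((perN : Nat) : Int))).getD ""
            let rest := match PySem.List.remove? keys leader with
              | some l => l
              | none => keys
            let r := PySem.Int.mod k ((perN : Nat) : Int)
            let j := pvWhileJ fact r keys.length ((nN : Int) - 1)
            let individual := [[leader]] ++
               (PySem.List.slice rest none (some ((nN : Int) - 1 - j))).map (fun s => [s])
            let tail := PySem.List.slice rest (some ((nN : Int) - 1 - j)) none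
            let st := (PySem.List.pyRange j 0 (-1)).foldl (pvStepB fact) (tail, r, individual)
            st.2.2)) ∘ (fun kN : Nat => ((kN : Nat) : Int)))
        = (List.range mN).map (fun kN =>
            [feasible.getD (kN / perN) ""] ::
              (pvUnrank (nN - 1) (keys.filter (fun s => decide (s ≠ feasible.getD (kN / perN) "")))
                (kN % perN)).map (fun s => [s])) := by
      apply List.map_congr_left
      intro kN hkN
      rw [List.mem_range] at hkN
      exact hbody kN (by omega)
    rw [hcongr]
    -- the full decoded table equals the A-side flatMap
    have hAfull : (List.range totalN).map (fun kN =>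
          [feasible.getD (kN / perN) ""] ::
            (pvUnrank (nN - 1) (keys.filter (fun s => decide (s ≠ feasible.getD (kN / perN) "")))
              (kN % perN)).map (fun s => [s]))
        = feasible.flatMap (fun leader =>
            (PySem.List.permutations (keys.filter (fun s => decide (s ≠ leader)))
                (keys.filter (fun s => decide (s ≠ leader))).length).map
              (fun perm => [leader] :: perm.map (fun g => [g]))) := by
      rw [htotal, pvChunk]
      rw [← pvFlatMapGetD "" _ feasible]
      apply List.flatMap_congr
      intro i hi
      rw [List.mem_range] at hi
      have hleadmem : feasible.getD i "" ∈ keys := by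
        rw [List.getD_eq_getElem _ _ hi]
        exact List.mem_of_mem_filter (List.getElem_mem hi)
      have hrest : (keys.filter (fun s => decide (s ≠ feasible.getD i ""))).length = nN - 1 := by
        have := pvFilterNeLen keys (feasible.getD i "") hnd hleadmem
        have hNpos : 0 < nN := by
          have h1 : feasible.length ≤ nN := by
            rw [hfs, hnN]; exact List.length_filter_le _ _
          omega
        omega
      have hinner : (List.range perN).map (fun j =>
            [feasible.getD ((i * perN + j) / perN) ""] ::
              (pvUnrank (nN - 1)
                (keys.filter (fun s => decide (s ≠ feasible.getD ((i * perN + j) / perN) "")))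
                ((i * perN + j) % perN)).map (fun s => [s]))
          = (List.range perN).map (fun j =>
            [feasible.getD i ""] ::
              (pvUnrank (nN - 1) (keys.filter (fun s => decide (s ≠ feasible.getD i "")))
                j).map (fun s => [s])) := by
        apply List.map_congr_left
        intro j hj
        rw [List.mem_range] at hj
        have hdiv : (i * perN + j) / perN = i := by
          rw [Nat.add_comm, Nat.add_mul_div_right _ _ hperpos, Nat.div_eq_of_lt hj, Nat.zero_add]
        have hmod : (i * perN + j) % perN = j := by
          rw [Nat.add_comm, Nat.add_mul_mod_self_right, Nat.mod_eq_of_lt hj]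
        rw [hdiv, hmod]
      rw [hinner]
      have hmapmap : (List.range perN).map (fun j =>
            [feasible.getD i ""] ::
              (pvUnrank (nN - 1) (keys.filter (fun s => decide (s ≠ feasible.getD i ""))) j).map
                (fun s => [s]))
          = ((List.range perN).map
              (pvUnrank (nN - 1) (keys.filter (fun s => decide (s ≠ feasible.getD i ""))))).map
              (fun p => [feasible.getD i ""] :: p.map (fun g => [g])) := by
        rw [List.map_map]
        rfl
      rw [hmapmap, hperdef, pvUnrankPerm (nN - 1) _ hrest, hrest]
    -- truncate: range mN = take of range totalN
    have htake : (List.range mN).map (fun kN =>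
          [feasible.getD (kN / perN) ""] ::
            (pvUnrank (nN - 1) (keys.filter (fun s => decide (s ≠ feasible.getD (kN / perN) "")))
              (kN % perN)).map (fun s => [s]))
        = ((List.range totalN).map (fun kN =>
            [feasible.getD (kN / perN) ""] ::
              (pvUnrank (nN - 1) (keys.filter (fun s => decide (s ≠ feasible.getD (kN / perN) "")))
                (kN % perN)).map (fun s => [s]))).take nm.toNat := by
      rw [← List.map_take, List.take_range, ← hmdef]
    rw [htake, hAfull]

-- ===== VERDICT (by name: the statement is the Claim_ definition above) =====
theorem makeF0_spec : Claim_equal_makeF0 := by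
  intro suppliers capacity current_capacity nm _
  show makeF0 suppliers capacity current_capacity nm
      = makeF0_alt suppliers capacity current_capacity nm
  have hA := pvTopA nm (PySem.Dict.keys (PySem.Dict.ofList suppliers))
      (fun s => (PySem.Dict.get? (PySem.Dict.ofList suppliers) s).getD 0 ≤ current_capacity)
  have hB := pvMainB (PySem.Dict.keys (PySem.Dict.ofList suppliers))
      (PySem.Dict.nodup_keys_ofList suppliers)
      (fun s => (PySem.Dict.get? (PySem.Dict.ofList suppliers) s).getD 0 ≤ current_capacity) nm
  exact hA.trans hB.symm
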